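-- pv_equiv track=rewrite | github.com/jczjkd9vmn-glitch/tw-quant | src/tw_quant/data_sources/twse_provider.py | _unique_fields
-- ===== SOURCE A (Python) =====
-- def _unique_fields(fields: list[object]) -> list[str]:
--     counts: dict[str, int] = {}
--     output: list[str] = []
--     for field in fields:
--         text = str(field).strip()
--         counts[text] = counts.get(text, 0) + 1
--         output.append(text if counts[text] == 1 else f"{text}_{counts[text]}")
--     return output
-- ===== SOURCE B (Python) =====
-- def _unique_fields(fields: list[object]) -> list[str]:
--     texts = [str(field).strip() for field in fields]
--     index: dict[str, list[int]] = {}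
--     for pos, text in enumerate(texts):
--         index.setdefault(text, []).append(pos)
--     out = [""] * len(texts)
--     for text, positions in index.items():
--         for rank, pos in enumerate(positions):
--             out[pos] = text if rank == 0 else f"{text}_{rank + 1}"
--     return out
-- ===== Notes on version B (the rewrite author's own statement) =====
-- stated objective: alternative
-- what changed: Instead of streaming with a running counter dict, B first builds an index from each stripped name to its list of positions, then fills a pre-sized output list group by group, writing the plain text at a group's first position and text_{rank+1} at later ones.
import Mathlib
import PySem

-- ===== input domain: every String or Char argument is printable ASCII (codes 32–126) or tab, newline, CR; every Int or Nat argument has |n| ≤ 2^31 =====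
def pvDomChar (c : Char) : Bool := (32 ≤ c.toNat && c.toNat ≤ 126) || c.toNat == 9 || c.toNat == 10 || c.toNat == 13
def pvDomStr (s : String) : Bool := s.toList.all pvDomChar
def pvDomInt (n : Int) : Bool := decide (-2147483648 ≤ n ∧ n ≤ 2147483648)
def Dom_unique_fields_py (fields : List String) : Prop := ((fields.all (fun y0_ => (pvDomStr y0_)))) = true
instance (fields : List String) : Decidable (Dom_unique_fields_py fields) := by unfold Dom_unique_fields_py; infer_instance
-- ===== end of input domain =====

-- B replaces A's streaming counter dict by a position index per stripped name plus a group-by-group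
-- fill of a pre-sized output list (objective: alternative decomposition, same cost).

-- ===== PORT A =====
def unique_fields_py (fields : List String) : List String :=
  (fields.foldl
    (fun (st : PySem.Dict String Int × List String) field =>
      let text := PySem.Str.strip field
      let counts := st.1.insert text (st.1.getD text 0 + 1)
      (counts,
        st.2 ++ [if counts.getD text 0 == 1 then text
                 else text ++ "_" ++ PySem.Int.toStr (counts.getD text 0)]))
    ((PySem.Dict.empty : PySem.Dict String Int), [])).2

-- ===== PORT B =====
-- out[pos] = v is ported as List.set pos.toNat v: pos is a nonnegative enumerate index < len(out),
-- so Python's assignment never raises and toNat is exact here.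
def unique_fields_py_alt (fields : List String) : List String :=
  let texts := fields.map PySem.Str.strip
  let index :=
    (PySem.List.enumerate texts 0).foldl
      (fun (d : PySem.Dict String (List Int)) p => d.modify p.2 [] (· ++ [p.1]))
      (PySem.Dict.empty : PySem.Dict String (List Int))
  let out := List.replicate texts.length ""
  index.items.foldl
    (fun out kv =>
      (PySem.List.enumerate kv.2 0).foldl
        (fun (o : List String) jp =>
          o.set jp.2.toNat
            (if jp.1 == 0 then kv.1 else kv.1 ++ "_" ++ PySem.Int.toStr (jp.1 + 1)))
        out)
    out

-- ===== PRECONDITION & SPEC =====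
def Spec_unique_fields_py (fields : List String) (out : List String) : Prop := out = unique_fields_py_alt fields
instance (fields : List String) (out : List String) : Decidable (Spec_unique_fields_py fields out) := by unfold Spec_unique_fields_py; infer_instance

-- ===== CLAIM (what is proved, stated in full; the proofs are below) =====
def Claim_equal_unique_fields_py : Prop := ∀ (fields : List String), Dom_unique_fields_py fields → Spec_unique_fields_py fields (unique_fields_py fields)

-- ===== LEMMAS AND PROOFS =====
def renderA (t : String) (c : Int) : String :=
  if c == 1 then t else t ++ "_" ++ PySem.Int.toStr c

def buildFrom : List String → List String → List String
  | _, [] => []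
  | pre, t :: rest => renderA t ((pre.count t : Int) + 1) :: buildFrom (pre ++ [t]) rest

lemma buildFrom_length (pre l : List String) : (buildFrom pre l).length = l.length := by
  induction l generalizing pre with
  | nil => rfl
  | cons t rest ih => simp [buildFrom, ih]

lemma counter_insert (pre : List String) (t : String) :
    (PySem.Dict.counter pre).insert t ((PySem.Dict.counter pre).getD t 0 + 1)
      = PySem.Dict.counter (pre ++ [t]) := by
  have h := PySem.Dict.foldl_insert_getD_add_one_eq_counter (κ := String) (pre ++ [t])
  rw [List.foldl_append] at h
  rw [PySem.Dict.foldl_insert_getD_add_one_eq_counter] at h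
  simpa using h

lemma A_loop (l pre acc) :
    (l.foldl
      (fun (st : PySem.Dict String Int × List String) text =>
        let counts := st.1.insert text (st.1.getD text 0 + 1)
        (counts,
          st.2 ++ [if counts.getD text 0 == 1 then text
                   else text ++ "_" ++ PySem.Int.toStr (counts.getD text 0)]))
      (PySem.Dict.counter pre, acc)).2 = acc ++ buildFrom pre l := by
  induction l generalizing pre acc with
  | nil => simp [buildFrom]
  | cons t rest ih =>
    simp only [List.foldl_cons]
    rw [show ((PySem.Dict.counter pre).insert t ((PySem.Dict.counter pre).getD t 0 + 1),
          acc ++ [if ((PySem.Dict.counter pre).insert t ((PySem.Dict.counter pre).getD t 0 + 1)).getD t 0 == 1 then t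
                  else t ++ "_" ++ PySem.Int.toStr (((PySem.Dict.counter pre).insert t ((PySem.Dict.counter pre).getD t 0 + 1)).getD t 0)])
        = (PySem.Dict.counter (pre ++ [t]),
           acc ++ [renderA t ((pre.count t : Int) + 1)]) from ?_]
    · rw [ih]
      simp [buildFrom]
    · have hc := counter_insert pre t
      rw [PySem.Dict.getD_insert_self, PySem.Dict.getD_counter]
      rw [PySem.Dict.getD_counter] at hc
      rw [hc]
      simp [renderA]


def stepA (st : PySem.Dict String Int × List String) (text : String) :
    PySem.Dict String Int × List String :=
  (st.1.insert text (st.1.getD text 0 + 1),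
    st.2 ++ [if (st.1.insert text (st.1.getD text 0 + 1)).getD text 0 == 1 then text
             else text ++ "_" ++ PySem.Int.toStr ((st.1.insert text (st.1.getD text 0 + 1)).getD text 0)])

lemma A_eq_build (fields : List String) :
    unique_fields_py fields = buildFrom [] (fields.map PySem.Str.strip) := by
  unfold unique_fields_py
  have hz : (fun (st : PySem.Dict String Int × List String) field =>
      let text := PySem.Str.strip field
      let counts := st.1.insert text (st.1.getD text 0 + 1)
      (counts,
        st.2 ++ [if counts.getD text 0 == 1 then text
                 else text ++ "_" ++ PySem.Int.toStr (counts.getD text 0)]))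
      = (fun (st : PySem.Dict String Int × List String) field => stepA st (PySem.Str.strip field)) := rfl
  have hm := List.foldl_map (f := PySem.Str.strip) (g := stepA) (l := fields)
      (init := ((PySem.Dict.empty : PySem.Dict String Int), ([] : List String)))
  rw [hz, ← hm]
  have he : (PySem.Dict.empty : PySem.Dict String Int) = PySem.Dict.counter [] := rfl
  rw [he]
  have := A_loop (fields.map PySem.Str.strip) [] []
  exact this

def posList : List String → String → Int → List Int
  | [], _, _ => []
  | x :: l, t, n => (if x = t then [n] else []) ++ posList l t (n + 1)

lemma index_getD (l : List String) (t : String) :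
    ∀ (n : Int) (d : PySem.Dict String (List Int)),
    ((PySem.List.enumerate l n).foldl
      (fun (d : PySem.Dict String (List Int)) p => d.modify p.2 [] (· ++ [p.1])) d).getD t []
      = d.getD t [] ++ posList l t n := by
  induction l with
  | nil => intro n d; simp [PySem.List.enumerate_nil, posList]
  | cons x l ih =>
    intro n d
    rw [PySem.List.enumerate_cons, List.foldl_cons, ih]
    rw [PySem.Dict.getD_modify]
    by_cases h : t = x <;> simp [posList, h]
    exact fun hh => h hh.symm

lemma mem_posList (l : List String) (t : String) :
    ∀ (n p : Int), p ∈ posList l t n →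
      ∃ k : Nat, ∃ hk : k < l.length, p = n + k ∧ l[k] = t := by
  induction l with
  | nil => simp [posList]
  | cons x l ih =>
    intro n p hp
    simp only [posList, List.mem_append] at hp
    rcases hp with hp | hp
    · refine ⟨0, by simp, ?_, ?_⟩
      · split at hp <;> simp_all
      · split at hp <;> simp_all
    · obtain ⟨k, hk, hpk, hlk⟩ := ih (n + 1) p hp
      exact ⟨k + 1, by simpa using hk, by omega, by simpa using hlk⟩

lemma posList_nonneg_shift (l : List String) (t : String) :
    ∀ (n p : Int), p ∈ posList l t n → n ≤ p := by
  intro n p hp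
  obtain ⟨k, hk, hpk, _⟩ := mem_posList l t n p hp
  omega

lemma posList_nodup (l : List String) (t : String) : ∀ n, (posList l t n).Nodup := by
  induction l with
  | nil => simp [posList]
  | cons x l ih =>
    intro n
    by_cases h : x = t <;> simp [posList, h, ih]
    intro hmem
    have := posList_nonneg_shift l t (n + 1) n hmem
    omega

lemma posList_getElem (l : List String) (t : String) :
    ∀ (n : Int) (i : Nat) (hi : i < l.length), l[i] = t →
      (posList l t n)[(l.take i).count t]? = some (n + i) := by
  induction l with
  | nil => simp
  | cons x l ih =>
    intro n i hi hli
    match i with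
    | 0 =>
      simp at hli
      simp [posList, hli, List.take, List.count_nil]
    | Nat.succ k =>
      have hk : k < l.length := by simpa using hi
      have hlk : l[k] = t := by simpa using hli
      have := ih (n + 1) k hk hlk
      by_cases h : x = t
      · simp only [posList, h, List.take_succ_cons, List.count_cons]
        simp only [beq_self_eq_true, if_true, List.singleton_append, List.getElem?_cons_succ]
        rw [this]
        congr 1
        push_cast
        ring
      · simp only [posList, if_neg h, List.take_succ_cons, List.count_cons, List.nil_append]
        have hb : (x == t) = false := by simpa using h
        simp [hb, this]
        omega

-- generic write-fold lemmas (inner fill loop shape)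
lemma fill_length (g : Int × Int → String) (us : List (Int × Int)) :
    ∀ init : List String,
    (us.foldl (fun o u => o.set u.2.toNat (g u)) init).length = init.length := by
  induction us with
  | nil => intro init; rfl
  | cons u us ih => intro init; rw [List.foldl_cons, ih]; simp

lemma fill_getElem?_notmem (g : Int × Int → String) (us : List (Int × Int)) (i : Nat) :
    ∀ init : List String, (∀ u ∈ us, u.2.toNat ≠ i) →
    (us.foldl (fun o u => o.set u.2.toNat (g u)) init)[i]? = init[i]? := by
  induction us with
  | nil => intro init _; rfl
  | cons u us ih =>
    intro init h
    rw [List.foldl_cons, ih _ (fun w hw => h w (by simp [hw]))]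
    rw [List.getElem?_set_ne (h u (by simp))]

lemma fill_getElem?_write (g : Int × Int → String) (u : Int × Int) (us1 us2 : List (Int × Int))
    (i : Nat) (init : List String) (hu : u.2.toNat = i) (hi : i < init.length)
    (h2 : ∀ w ∈ us2, w.2.toNat ≠ i) :
    ((us1 ++ u :: us2).foldl (fun o u => o.set u.2.toNat (g u)) init)[i]? = some (g u) := by
  rw [List.foldl_append, List.foldl_cons]
  rw [fill_getElem?_notmem g us2 i _ h2]
  subst hu
  rw [List.getElem?_set_self (by rw [fill_length]; exact hi)]

def valB (t : String) (j : Int) : String :=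
  if j == 0 then t else t ++ "_" ++ PySem.Int.toStr (j + 1)

def fillG (texts : List String) (o : List String) (k : String) : List String :=
  (PySem.List.enumerate (posList texts k 0) 0).foldl
    (fun o jp => o.set jp.2.toNat (valB k jp.1)) o

lemma O_len (texts : List String) (K : List String) :
    ∀ o : List String, (K.foldl (fillG texts) o).length = o.length := by
  induction K with
  | nil => intro o; rfl
  | cons k K ih => intro o; rw [List.foldl_cons, ih, fillG, fill_length]

lemma O_skip (texts : List String) (K : List String) (i : Nat) :
    ∀ o : List String,
    (∀ k ∈ K, ∀ u ∈ PySem.List.enumerate (posList texts k 0) 0, u.2.toNat ≠ i) →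
    (K.foldl (fillG texts) o)[i]? = o[i]? := by
  induction K with
  | nil => intro o _; rfl
  | cons k K ih =>
    intro o h
    rw [List.foldl_cons, ih _ (fun w hw => h w (by simp [hw]))]
    exact fill_getElem?_notmem _ _ _ _ (h k (by simp))

lemma O_at (texts : List String) (i : Nat) (hi : i < texts.length)
    (K : List String) (hK : K.Nodup) (htK : texts[i] ∈ K) :
    ∀ o : List String, o.length = texts.length →
    (K.foldl (fillG texts) o)[i]? = some (valB texts[i] ((texts.take i).count texts[i])) := by
  intro o ho
  obtain ⟨K1, K2, rfl⟩ := List.append_of_mem htK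
  rw [List.nodup_append] at hK
  obtain ⟨hK1, hK2c, hdisj⟩ := hK
  rw [List.nodup_cons] at hK2c
  have ht1 : texts[i] ∉ K1 := fun h => hdisj _ h _ (by simp) rfl
  have ht2 : texts[i] ∉ K2 := hK2c.1
  rw [List.foldl_append, List.foldl_cons]
  -- K2 never writes position i
  rw [O_skip texts K2 i _ ?hskip]
  case hskip =>
    intro k hk u hu
    have hkt : k ≠ texts[i] := fun h => ht2 (h ▸ hk)
    rw [PySem.List.mem_enumerate_iff] at hu
    obtain ⟨m, hm, rfl⟩ := hu
    have hmem : (posList texts k 0)[m] ∈ posList texts k 0 := List.getElem_mem _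
    obtain ⟨k', hk', hpk, hlk⟩ := mem_posList texts k 0 _ hmem
    intro hcon
    have hki : k' = i := by omega
    subst hki
    exact hkt hlk.symm
  -- the group of texts[i] writes exactly valB at rank = count in prefix
  have hlen1 : (K1.foldl (fillG texts) o).length = texts.length := by rw [O_len, ho]
  set t := texts[i] with hti
  set j := (texts.take i).count t with hj
  have hpos := posList_getElem texts t 0 i hi rfl
  have hjlt : j < (posList texts t 0).length := by
    by_contra hcon
    rw [List.getElem?_eq_none (by omega)] at hpos
    simp at hpos
  have hpj : (posList texts t 0)[j] = (0 : Int) + i := by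
    have := List.getElem?_eq_getElem hjlt
    rw [this] at hpos
    exact Option.some.inj hpos
  have hdecomp : posList texts t 0
      = (posList texts t 0).take j ++ (0 + (i : Int)) :: (posList texts t 0).drop (j + 1) := by
    conv_lhs => rw [← List.take_append_drop j (posList texts t 0)]
    rw [List.drop_eq_getElem_cons hjlt, hpj]
  rw [fillG, hdecomp, PySem.List.enumerate_append, PySem.List.enumerate_cons]
  have hjtake : ((posList texts t 0).take j).length = j := by
    rw [List.length_take]; omega
  rw [hjtake]
  rw [fill_getElem?_write (fun jp => valB t jp.1) (0 + (j : Int), 0 + (i : Int)) _ _ i _ (by simp) (by rw [hlen1]; exact hi) ?h2]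
  · simp
  case h2 =>
    intro w hw
    rw [PySem.List.mem_enumerate_iff] at hw
    obtain ⟨m, hm, rfl⟩ := hw
    have hmemdrop : ((posList texts t 0).drop (j + 1))[m] ∈ (posList texts t 0).drop (j + 1) :=
      List.getElem_mem _
    have hnd := posList_nodup texts t 0
    rw [hdecomp] at hnd
    rw [List.nodup_append] at hnd
    have hnotin : (0 + (i : Int)) ∉ (posList texts t 0).drop (j + 1) := by
      have := hnd.2.1
      rw [List.nodup_cons] at this
      exact this.1
    have hne : ((posList texts t 0).drop (j + 1))[m] ≠ 0 + (i : Int) := by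
      intro h; exact hnotin (h ▸ hmemdrop)
    have hmemfull : ((posList texts t 0).drop (j + 1))[m] ∈ posList texts t 0 :=
      List.mem_of_mem_drop hmemdrop
    obtain ⟨k', hk', hpk, _⟩ := mem_posList texts t 0 _ hmemfull
    intro hcon
    apply hne
    omega


lemma buildFrom_getElem? (l : List String) :
    ∀ (pre : List String) (i : Nat) (hi : i < l.length),
    (buildFrom pre l)[i]?
      = some (renderA (l[i]'hi) (((pre.count (l[i]'hi) + (l.take i).count (l[i]'hi) : Nat) : Int) + 1)) := by
  induction l with
  | nil => intro pre i hi; simp at hi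
  | cons x rest ih =>
    intro pre i hi
    match i with
    | 0 => simp [buildFrom]
    | Nat.succ k =>
      have hk : k < rest.length := by simpa using hi
      rw [show buildFrom pre (x :: rest) = renderA x ((pre.count x : Int) + 1) :: buildFrom (pre ++ [x]) rest from rfl]
      rw [List.getElem?_cons_succ, ih (pre ++ [x]) k hk]
      congr 2
      simp only [List.getElem_cons_succ, List.take_succ_cons, List.count_append, List.count_cons]
      by_cases h : x = rest[k]
      · simp [h]; omega
      · simp [h]

lemma valB_eq_renderA (t : String) (j : Nat) : valB t (j : Int) = renderA t ((j : Int) + 1) := by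
  by_cases h : j = 0 <;> simp [valB, renderA, h]


def idxOf (texts : List String) : PySem.Dict String (List Int) :=
  (PySem.List.enumerate texts 0).foldl
    (fun (d : PySem.Dict String (List Int)) p => d.modify p.2 [] (· ++ [p.1]))
    (PySem.Dict.empty : PySem.Dict String (List Int))

lemma B_eq_build (fields : List String) :
    unique_fields_py_alt fields = buildFrom [] (fields.map PySem.Str.strip) := by
  have h0 : unique_fields_py_alt fields =
      (idxOf (fields.map PySem.Str.strip)).items.foldl
        (fun out kv =>
          (PySem.List.enumerate kv.2 0).foldl
            (fun (o : List String) jp => o.set jp.2.toNat (valB kv.1 jp.1)) out)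
        (List.replicate (fields.map PySem.Str.strip).length "") := rfl
  rw [h0]
  set texts := fields.map PySem.Str.strip with htexts
  have hkeys : (idxOf texts).keys = PySem.Set.ofList texts := by
    rw [idxOf, PySem.Dict.keys_foldl_modify_key (key := fun p => p.2)
        (f := fun _ (p : Int × String) => (· ++ [p.1]))]
    rw [PySem.Dict.keys_empty, PySem.List.map_snd_enumerate, PySem.Set.update_nil_left]
  have hnd : (idxOf texts).keys.Nodup := by rw [hkeys]; exact PySem.Set.nodup_ofList texts
  have hgetD : ∀ t, (idxOf texts).getD t [] = posList texts t 0 := by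
    intro t
    rw [idxOf, index_getD texts t 0 PySem.Dict.empty, PySem.Dict.getD_empty, List.nil_append]
  rw [PySem.Dict.items_eq_map_keys _ hnd []]
  rw [List.foldl_map]
  rw [PySem.List.foldl_congr_mem (g := fillG texts)
      (h := by
        intro o k hk
        show (PySem.List.enumerate ((idxOf texts).getD k []) 0).foldl
            (fun (o : List String) jp => o.set jp.2.toNat (valB k jp.1)) o = fillG texts o k
        rw [hgetD k, fillG])]
  apply List.ext_getElem?
  intro i
  by_cases hi : i < texts.length
  · rw [O_at texts i hi _ hnd (by rw [hkeys]; exact (PySem.Set.mem_ofList _ _).2 (List.getElem_mem hi)) _ (by simp)]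
    rw [buildFrom_getElem? texts [] i hi]
    simp only [List.count_nil, Nat.zero_add]
    rw [valB_eq_renderA]
  · rw [List.getElem?_eq_none, List.getElem?_eq_none]
    · rw [buildFrom_length]; omega
    · rw [O_len]; simp; omega

-- ===== VERDICT (by name: the statement is the Claim_ definition above) =====
theorem unique_fields_py_spec : Claim_equal_unique_fields_py := by
  intro fields _
  unfold Spec_unique_fields_py
  rw [A_eq_build, B_eq_build]
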